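-- pv_equiv track=rewrite | github.com/ronaldfelipse/Netflix-K-Means | sink.py | SumVect
-- ===== SOURCE A (Python) =====
-- def SumVect(Vect1,Vect2):
--
--     VecTSum = {}
--
--     for k in Vect1.keys():
--         if k in VecTSum:
--             VecTSum[k] = int(VecTSum[k]) + int(Vect1[k])
--         else:
--             VecTSum[k] = int(Vect1[k])
--
--     for j in Vect2.keys():
--         if j in VecTSum:
--             VecTSum[j] = int(VecTSum[j]) + int(Vect2[j])
--         else:
--             VecTSum[j] = int(Vect2[j])
--
--     return VecTSum
-- ===== SOURCE B (Python) =====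
-- def SumVect(Vect1, Vect2):
--     # union of keys in Vect1-then-Vect2 order, then one pass computing each total directly
--     keys = list(Vect1) + [k for k in Vect2 if k not in Vect1]
--     return {k: int(Vect1.get(k, 0)) + int(Vect2.get(k, 0)) for k in keys}
-- ===== Notes on version B (the rewrite author's own statement) =====
-- stated objective: simpler
-- what changed: Replaces A's two sequential accumulate loops (copy Vect1 into the result, then add Vect2 entry by entry with an in-result membership branch) by building the ordered union of the key sets once and computing each final value directly in a single comprehension.
import Mathlib
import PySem

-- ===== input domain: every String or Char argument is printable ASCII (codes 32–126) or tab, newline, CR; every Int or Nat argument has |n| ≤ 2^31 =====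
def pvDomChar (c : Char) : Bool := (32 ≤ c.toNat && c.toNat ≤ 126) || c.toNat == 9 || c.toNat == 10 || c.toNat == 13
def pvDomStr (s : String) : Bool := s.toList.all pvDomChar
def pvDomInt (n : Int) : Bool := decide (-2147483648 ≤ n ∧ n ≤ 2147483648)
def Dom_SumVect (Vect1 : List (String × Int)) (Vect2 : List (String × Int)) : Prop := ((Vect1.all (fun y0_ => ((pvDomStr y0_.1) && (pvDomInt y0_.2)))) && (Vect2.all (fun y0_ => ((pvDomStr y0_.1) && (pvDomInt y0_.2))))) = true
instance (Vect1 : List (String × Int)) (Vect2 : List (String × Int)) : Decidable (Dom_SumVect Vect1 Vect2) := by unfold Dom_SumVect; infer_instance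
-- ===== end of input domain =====

-- B is a simpler single-pass merge: it forms the ordered union of the key sets and computes
-- each final value directly, instead of A's copy-then-accumulate pair of loops.

-- ===== PORT A =====
-- literal transliteration of A: two accumulate loops over the keys of each dict.
-- (Vect1[k] inside the loop is ported as getD k 0: it is guarded by k ∈ keys, so it is exact.)
def SumVect (Vect1 : List (String × Int)) (Vect2 : List (String × Int)) : List (String × Int) :=
  let d1 : PySem.Dict String Int := PySem.Dict.mk Vect1
  let d2 : PySem.Dict String Int := PySem.Dict.mk Vect2
  let s1 := (PySem.Dict.keys d1).foldl (fun acc k =>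
      if PySem.Dict.contains acc k then
        PySem.Dict.insert acc k (PySem.Dict.getD acc k 0 + PySem.Dict.getD d1 k 0)
      else
        PySem.Dict.insert acc k (PySem.Dict.getD d1 k 0)) PySem.Dict.empty
  let s2 := (PySem.Dict.keys d2).foldl (fun acc j =>
      if PySem.Dict.contains acc j then
        PySem.Dict.insert acc j (PySem.Dict.getD acc j 0 + PySem.Dict.getD d2 j 0)
      else
        PySem.Dict.insert acc j (PySem.Dict.getD d2 j 0)) s1
  PySem.Dict.items s2

-- ===== PORT B =====
-- literal transliteration of Source B: ordered key union, then one insert per key of the final value.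
def SumVect_alt (Vect1 : List (String × Int)) (Vect2 : List (String × Int)) : List (String × Int) :=
  let d1 : PySem.Dict String Int := PySem.Dict.mk Vect1
  let d2 : PySem.Dict String Int := PySem.Dict.mk Vect2
  let keys := PySem.Dict.keys d1 ++ (PySem.Dict.keys d2).filter (fun k => !(PySem.Dict.contains d1 k))
  PySem.Dict.items
    (keys.foldl (fun acc k =>
      PySem.Dict.insert acc k (PySem.Dict.getD d1 k 0 + PySem.Dict.getD d2 k 0)) PySem.Dict.empty)

-- ===== PRECONDITION & SPEC =====
-- Pre_ only states that each input association list has pairwise-distinct keys — exactly the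
-- lists that represent a Python dict (a Python dict can never contain a duplicate key), so no
-- input of the real function is excluded.
def Pre_SumVect (Vect1 : List (String × Int)) (Vect2 : List (String × Int)) : Prop :=
  (Vect1.map Prod.fst).Nodup ∧ (Vect2.map Prod.fst).Nodup
instance (Vect1 : List (String × Int)) (Vect2 : List (String × Int)) : Decidable (Pre_SumVect Vect1 Vect2) := by unfold Pre_SumVect; infer_instance

def pvWitness_SumVect : (List (String × Int)) × (List (String × Int)) :=
  ([("a", 1), ("b", 2)], [("b", 3), ("c", -4)])

def Spec_SumVect (Vect1 : List (String × Int)) (Vect2 : List (String × Int)) (out : List (String × Int)) : Prop := out = SumVect_alt Vect1 Vect2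
instance (Vect1 : List (String × Int)) (Vect2 : List (String × Int)) (out : List (String × Int)) : Decidable (Spec_SumVect Vect1 Vect2 out) := by unfold Spec_SumVect; infer_instance

-- ===== CLAIM (what is proved, stated in full; the proofs are below) =====
def Claim_equal_SumVect : Prop := ∀ (Vect1 : List (String × Int)) (Vect2 : List (String × Int)), Dom_SumVect Vect1 Vect2 → Pre_SumVect Vect1 Vect2 → Spec_SumVect Vect1 Vect2 (SumVect Vect1 Vect2)

-- ===== LEMMAS AND PROOFS =====

-- A's accumulate step at key j is a single insert of a conditional value.
theorem stepComb (d2 : PySem.Dict String Int) :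
    (fun (acc : PySem.Dict String Int) j =>
      if PySem.Dict.contains acc j then
        PySem.Dict.insert acc j (PySem.Dict.getD acc j 0 + PySem.Dict.getD d2 j 0)
      else
        PySem.Dict.insert acc j (PySem.Dict.getD d2 j 0))
    = (fun acc j => PySem.Dict.insert acc j
        (if PySem.Dict.contains acc j then PySem.Dict.getD acc j 0 + PySem.Dict.getD d2 j 0
         else PySem.Dict.getD d2 j 0)) := by
  funext acc j
  by_cases h : PySem.Dict.contains acc j <;> simp [h]

-- lookup after one accumulate loop over a duplicate-free key list
theorem getD_accum (d2 : PySem.Dict String Int) (l : List String) (hl : l.Nodup)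
    (s : PySem.Dict String Int) (k : String) :
    (l.foldl (fun acc j =>
      if PySem.Dict.contains acc j then
        PySem.Dict.insert acc j (PySem.Dict.getD acc j 0 + PySem.Dict.getD d2 j 0)
      else
        PySem.Dict.insert acc j (PySem.Dict.getD d2 j 0)) s).getD k 0
    = s.getD k 0 + (if k ∈ l then PySem.Dict.getD d2 k 0 else 0) := by
  induction l generalizing s with
  | nil => simp
  | cons j t ih =>
    rcases List.nodup_cons.mp hl with ⟨hj, ht⟩
    rw [List.foldl_cons, ih ht]
    have hstep : ∀ (s : PySem.Dict String Int),
        (if PySem.Dict.contains s j then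
          PySem.Dict.insert s j (PySem.Dict.getD s j 0 + PySem.Dict.getD d2 j 0)
        else
          PySem.Dict.insert s j (PySem.Dict.getD d2 j 0)).getD k 0
        = if k = j then s.getD j 0 + PySem.Dict.getD d2 j 0 else s.getD k 0 := by
      intro s
      by_cases h : PySem.Dict.contains s j
      · rw [if_pos h, PySem.Dict.getD_insert]
      · rw [if_neg h, PySem.Dict.getD_insert]
        have h0 : s.getD j 0 = 0 :=
          PySem.Dict.getD_of_not_contains s 0 (by simpa using h)
        rw [h0]; simp
    rw [hstep]
    by_cases hk : k = j
    · subst hk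
      simp [hj]
    · simp [hk, List.mem_cons]

theorem SumVect_spec_aux (Vect1 Vect2 : List (String × Int))
    (h1 : (Vect1.map Prod.fst).Nodup) (h2 : (Vect2.map Prod.fst).Nodup) :
    SumVect Vect1 Vect2 = SumVect_alt Vect1 Vect2 := by
  unfold SumVect SumVect_alt
  set d1 : PySem.Dict String Int := PySem.Dict.mk Vect1 with hd1
  set d2 : PySem.Dict String Int := PySem.Dict.mk Vect2 with hd2
  have hk1 : d1.keys.Nodup := by simpa [hd1, PySem.Dict.keys] using h1
  have hk2 : d2.keys.Nodup := by simpa [hd2, PySem.Dict.keys] using h2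
  -- the first loop, from the empty dict
  set F1 := d1.keys.foldl (fun acc k =>
      if PySem.Dict.contains acc k then
        PySem.Dict.insert acc k (PySem.Dict.getD acc k 0 + PySem.Dict.getD d1 k 0)
      else
        PySem.Dict.insert acc k (PySem.Dict.getD d1 k 0)) PySem.Dict.empty with hF1
  set F2 := d2.keys.foldl (fun acc j =>
      if PySem.Dict.contains acc j then
        PySem.Dict.insert acc j (PySem.Dict.getD acc j 0 + PySem.Dict.getD d2 j 0)
      else
        PySem.Dict.insert acc j (PySem.Dict.getD d2 j 0)) F1 with hF2
  -- lookups of intermediate and final results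
  have hmemD : ∀ (d : PySem.Dict String Int) (k : String),
      (if k ∈ d.keys then PySem.Dict.getD d k 0 else 0) = d.getD k 0 := by
    intro d k
    by_cases h : k ∈ d.keys
    · rw [if_pos h]
    · rw [if_neg h]
      refine (PySem.Dict.getD_of_not_contains d 0 ?_).symm
      rw [PySem.Dict.contains_eq_decide_mem_keys]
      simpa using h
  have hget1 : ∀ k, F1.getD k 0 = d1.getD k 0 := by
    intro k
    rw [hF1, getD_accum d1 d1.keys hk1, PySem.Dict.getD_empty]
    simpa using hmemD d1 k
  have hget2 : ∀ k, F2.getD k 0 = d1.getD k 0 + d2.getD k 0 := by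
    intro k
    rw [hF2, getD_accum d2 d2.keys hk2, hget1, hmemD d2 k]
  -- keys of intermediate and final results
  have hkeys1 : F1.keys = d1.keys := by
    rw [hF1, stepComb d1, PySem.Dict.keys_foldl_insert, PySem.Dict.keys_empty,
      PySem.Set.update_nil_left, PySem.Set.ofList_eq_self_of_nodup _ hk1]
  have hcontains : ∀ y, (!(PySem.Set.contains d1.keys y)) = (!(PySem.Dict.contains d1 y)) := by
    intro y
    rw [PySem.Dict.contains_eq_decide_mem_keys]
    simp [PySem.Set.contains]
  have hkeys2 : F2.keys = d1.keys ++ d2.keys.filter (fun k => !(PySem.Dict.contains d1 k)) := by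
    rw [hF2, stepComb d2, PySem.Dict.keys_foldl_insert, hkeys1,
      PySem.Set.update_eq_append_filter, PySem.Set.ofList_eq_self_of_nodup _ hk2]
    exact congrArg _ (List.filter_congr (fun y _ => hcontains y))
  -- both key lists are duplicate-free
  have hnd2 : F2.keys.Nodup := by
    rw [hF2, stepComb d2]
    refine PySem.Dict.nodup_keys_foldl_insert _ _ _ ?_
    rw [hF1, stepComb d1]
    exact PySem.Dict.nodup_keys_foldl_insert _ _ _ (by simp)
  have hndB : (d1.keys ++ d2.keys.filter (fun k => !(PySem.Dict.contains d1 k))).Nodup := by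
    rw [← hkeys2]; exact hnd2
  -- B's single loop inserts every union key once, each with its final value
  have hB : (PySem.Dict.items
      ((d1.keys ++ d2.keys.filter (fun k => !(PySem.Dict.contains d1 k))).foldl
        (fun acc k => PySem.Dict.insert acc k (PySem.Dict.getD d1 k 0 + PySem.Dict.getD d2 k 0))
        PySem.Dict.empty))
      = (d1.keys ++ d2.keys.filter (fun k => !(PySem.Dict.contains d1 k))).map
          (fun k => (k, PySem.Dict.getD d1 k 0 + PySem.Dict.getD d2 k 0)) := by
    rw [PySem.Dict.items_foldl_insert_fresh _ (fun x => x)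
      (fun k => PySem.Dict.getD d1 k 0 + PySem.Dict.getD d2 k 0) PySem.Dict.empty
      (fun a _ => PySem.Dict.contains_empty a) (by simpa using hndB)]
    simp [PySem.Dict.empty]
  rw [hB, PySem.Dict.items_eq_map_keys F2 hnd2 0, hkeys2]
  refine List.map_congr_left ?_
  intro k _
  rw [hget2]

-- ===== VERDICT (by name: the statement is the Claim_ definition above) =====
theorem SumVect_spec : Claim_equal_SumVect := by
  intro Vect1 Vect2 _ hpre
  exact SumVect_spec_aux Vect1 Vect2 hpre.1 hpre.2
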